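-- pv_equiv track=rewrite | github.com/ShihanUTSA/Time-series-prediction-using-a-Recurrent-Neural-Network | my_answers.py | cleaned_text
-- ===== SOURCE A (Python) =====
-- import string
--
-- def cleaned_text(text):
--     punctuation = ['!', ',', '.', ':', ';', '?']
--     extra1=['\xa0', '¢', '¨', '©', 'ã']
--     extra2=['à', 'â', 'è', 'é']
--     remove_set=(set(string.printable) | set(extra1) |set(extra2))-(set(string.ascii_lowercase)| set(punctuation) |set(' '))
--     remove_set=list(remove_set)
--     for c in remove_set:
--         text=text.replace(c,' ')
--
--     return text
-- ===== SOURCE B (Python) =====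
-- import string
--
-- def cleaned_text(text):
--     # Complementary view: on printable-ASCII input the only characters that survive
--     # A's removal are lowercase letters, the six allowed punctuation marks and space.
--     keep = set(string.ascii_lowercase) | set('!,.:;? ')
--     return ''.join(ch if ch in keep else ' ' for ch in text)
-- ===== Notes on version B (the rewrite author's own statement) =====
-- stated objective: simpler
-- what changed: B drops the set-algebra remove_set and the per-character str.replace loop entirely: it uses the complementary keep-set (lowercase letters, the six allowed punctuation marks, space) and makes one pass over the text, emitting a space for every other character; equivalent on the printable-ASCII input domain.
import Mathlib
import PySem

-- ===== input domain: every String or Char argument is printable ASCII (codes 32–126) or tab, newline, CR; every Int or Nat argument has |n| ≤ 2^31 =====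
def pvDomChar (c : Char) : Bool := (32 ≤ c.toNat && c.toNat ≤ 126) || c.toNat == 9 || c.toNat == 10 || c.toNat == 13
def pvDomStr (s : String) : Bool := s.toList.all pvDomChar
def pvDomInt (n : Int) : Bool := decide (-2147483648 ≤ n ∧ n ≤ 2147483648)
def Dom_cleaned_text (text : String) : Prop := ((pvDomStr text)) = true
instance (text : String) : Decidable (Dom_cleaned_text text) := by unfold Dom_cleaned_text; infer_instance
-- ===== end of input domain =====

-- B drops A's remove_set and per-character str.replace loop: it keeps the complementary
-- keep-set (lowercase, allowed punctuation, space) and makes one pass over the text;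
-- equivalent on the printable-ASCII input domain Dom (outside Dom nothing is claimed).


-- string.printable as a list of characters
def pvPrintable : List Char :=
  "0123456789abcdefghijklmnopqrstuvwxyzABCDEFGHIJKLMNOPQRSTUVWXYZ!\"#$%&'()*+,-./:;<=>?@[\\]^_`{|}~ \t\n\r\x0B\x0C".toList

-- string.ascii_lowercase as a list of characters
def pvAsciiLowercase : List Char := "abcdefghijklmnopqrstuvwxyz".toList

-- ===== PORT A =====
-- A iterates over remove_set (a Python set) calling text.replace(c, ' ') for each element;
-- the result does not depend on that hash iteration order (each character is replaced by ' '
-- independently and ' ' is not in remove_set), so folding over the Set's list is exact.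
def cleaned_text (text : String) : String :=
  let punctuation : List Char := ['!', ',', '.', ':', ';', '?']
  let extra1 : List Char := ['\u00A0', '¢', '¨', '©', 'ã']
  let extra2 : List Char := ['à', 'â', 'è', 'é']
  let remove_set : PySem.Set Char :=
    PySem.Set.diff
      (PySem.Set.union (PySem.Set.union (PySem.Set.ofList pvPrintable) (PySem.Set.ofList extra1))
        (PySem.Set.ofList extra2))
      (PySem.Set.union (PySem.Set.union (PySem.Set.ofList pvAsciiLowercase) (PySem.Set.ofList punctuation))
        (PySem.Set.ofList [' ']))
  remove_set.foldl (fun t c => PySem.Str.replace t (String.ofList [c]) " ") text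

-- ===== PORT B =====
def cleaned_text_alt (text : String) : String :=
  let keep : PySem.Set Char :=
    PySem.Set.union (PySem.Set.ofList pvAsciiLowercase) (PySem.Set.ofList "!,.:;? ".toList)
  String.ofList (text.toList.map (fun ch => if keep.contains ch then ch else ' '))

-- ===== PRECONDITION & SPEC =====
def Spec_cleaned_text (text : String) (out : String) : Prop := out = cleaned_text_alt text
instance (text : String) (out : String) : Decidable (Spec_cleaned_text text out) := by unfold Spec_cleaned_text; infer_instance

-- ===== CLAIM (what is proved, stated in full; the proofs are below) =====
def Claim_equal_cleaned_text : Prop := ∀ (text : String), Dom_cleaned_text text → Spec_cleaned_text text (cleaned_text text)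

-- ===== LEMMAS AND PROOFS =====

-- the concrete remove_set A builds
def pvRS : PySem.Set Char :=
  PySem.Set.diff
    (PySem.Set.union (PySem.Set.union (PySem.Set.ofList pvPrintable) (PySem.Set.ofList ['\u00A0', '¢', '¨', '©', 'ã']))
      (PySem.Set.ofList ['à', 'â', 'è', 'é']))
    (PySem.Set.union (PySem.Set.union (PySem.Set.ofList pvAsciiLowercase) (PySem.Set.ofList ['!', ',', '.', ':', ';', '?']))
      (PySem.Set.ofList [' ']))

-- the concrete keep set B builds
def pvKS : PySem.Set Char :=
  PySem.Set.union (PySem.Set.ofList pvAsciiLowercase) (PySem.Set.ofList "!,.:;? ".toList)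

theorem pv_replace_go_single (c : Char) : ∀ (s : List Char) (fuel : Nat) (acc : List Char), s.length ≤ fuel →
    PySem.Chars.replace.go [c] [' '] fuel s acc
      = acc.reverse ++ s.map (fun x => if x = c then ' ' else x) := by
  intro s
  induction s with
  | nil => intro fuel acc h; cases fuel <;> simp [PySem.Chars.replace.go]
  | cons a t ih =>
    intro fuel acc h
    cases fuel with
    | zero => simp at h
    | succ f =>
      simp only [PySem.Chars.replace.go, List.isPrefixOf]
      by_cases hac : c = a
      · subst hac
        simp only [beq_self_eq_true, Bool.true_and, if_true]
        rw [show List.drop [c].length (c :: t) = t by simp]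
        rw [ih f ([' '].reverse ++ acc) (by simpa using h)]
        simp
      · have hb : (c == a) = false := by simp [hac]
        simp only [hb, Bool.false_and]
        rw [ih f (a :: acc) (by simpa using h)]
        have hne : (a = c) = False := by simp [Ne.symm hac]
        simp [hne]

-- text.replace(c, ' ') for a single character c is a pointwise map
theorem pv_replace_single (c : Char) (s : List Char) :
    PySem.Chars.replace s [c] [' '] = s.map (fun x => if x = c then ' ' else x) := by
  simp only [PySem.Chars.replace, List.isEmpty_cons]
  exact pv_replace_go_single c s s.length [] le_rfl

-- folding single-character replacements over rs (with ' ' ∉ rs) is one membership-test pass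
theorem pv_foldl_replace (rs : List Char) (hsp : ' ' ∉ rs) : ∀ (s : List Char),
    rs.foldl (fun l c => l.map (fun x => if x = c then ' ' else x)) s
      = s.map (fun x => if rs.contains x then ' ' else x) := by
  induction rs with
  | nil => intro s; simp
  | cons c rs ih =>
    intro s
    have hsp' : ' ' ∉ rs := fun h => hsp (List.mem_cons_of_mem _ h)
    simp only [List.foldl_cons]
    rw [ih hsp' (s.map (fun x => if x = c then ' ' else x)), List.map_map]
    refine List.map_congr_left (fun x _ => ?_)
    by_cases hx : x = c
    · subst hx
      have : rs.contains ' ' = false := by simpa using hsp'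
      simp
    · simp [hx]

-- ' ' is not in remove_set (it is subtracted out)
theorem pv_space_not_mem : ' ' ∉ pvRS := by
  set_option maxRecDepth 4096 in decide

-- the string-level fold of A computes the list-level fold of replacements
theorem pv_fold_toList (rs : List Char) : ∀ (text : String),
    (rs.foldl (fun t c => PySem.Str.replace t (String.ofList [c]) " ") text).toList
      = rs.foldl (fun l c => PySem.Chars.replace l [c] [' ']) text.toList := by
  induction rs with
  | nil => intro text; rfl
  | cons c rs ih =>
    intro text
    simp only [List.foldl_cons]
    rw [ih (PySem.Str.replace text (String.ofList [c]) " "), PySem.Str.toList_replace,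
      String.toList_ofList]
    rfl

-- on every domain character, remove_set membership is the complement of keep membership
theorem pv_rs_compl_ks (c : Char) (h : pvDomChar c = true) :
    (if pvRS.contains c then ' ' else c) = (if pvKS.contains c then c else ' ') := by
  have hall : (List.range 127).all (fun n =>
      !pvDomChar (Char.ofNat n) ||
        ((if pvRS.contains (Char.ofNat n) then ' ' else (Char.ofNat n))
          == (if pvKS.contains (Char.ofNat n) then (Char.ofNat n) else ' '))) = true := by
    set_option maxRecDepth 8192 in decide
  have hlt : c.toNat < 127 := by
    simp only [pvDomChar, Bool.or_eq_true, Bool.and_eq_true, decide_eq_true_eq, beq_iff_eq] at h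
    omega
  have := List.all_eq_true.mp hall c.toNat (List.mem_range.mpr hlt)
  rw [Char.ofNat_toNat] at this
  simpa [h] using this

-- ===== VERDICT (by name: the statement is the Claim_ definition above) =====
set_option maxRecDepth 100000 in
theorem cleaned_text_spec : Claim_equal_cleaned_text := by
  intro text hdom
  unfold Spec_cleaned_text cleaned_text cleaned_text_alt
  have h1 : (pvRS.foldl (fun t c => PySem.Str.replace t (String.ofList [c]) " ") text).toList
      = text.toList.map (fun x => if pvRS.contains x then ' ' else x) := by
    rw [pv_fold_toList pvRS text]
    have : ∀ l c, PySem.Chars.replace l [c] [' '] = l.map (fun x => if x = c then ' ' else x) :=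
      fun l c => pv_replace_single c l
    simp only [this]
    exact pv_foldl_replace pvRS pv_space_not_mem text.toList
  have hdom' : ∀ x ∈ text.toList, pvDomChar x = true := by
    have := hdom
    unfold Dom_cleaned_text pvDomStr at this
    exact List.all_eq_true.mp this
  show pvRS.foldl (fun t c => PySem.Str.replace t (String.ofList [c]) " ") text
      = String.ofList (text.toList.map (fun ch => if pvKS.contains ch then ch else ' '))
  calc pvRS.foldl (fun t c => PySem.Str.replace t (String.ofList [c]) " ") text
      = String.ofList (pvRS.foldl (fun t c => PySem.Str.replace t (String.ofList [c]) " ") text).toList := by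
        rw [String.ofList_toList]
    _ = String.ofList (text.toList.map (fun x => if pvRS.contains x then ' ' else x)) := by rw [h1]
    _ = String.ofList (text.toList.map (fun ch => if pvKS.contains ch then ch else ' ')) := by
        exact congrArg String.ofList (List.map_congr_left (fun x hx => pv_rs_compl_ks x (hdom' x hx)))
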